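-- pv_equiv track=rewrite | github.com/Hsieh-Wen/ASR-v1 | Utils/LM_data_prepare.py | remove_duplicated_sentence
-- ===== SOURCE A (Python) =====
-- def remove_duplicated_sentence(sent_list1, sent_list2):
--     """
--
--     """
--     save_labels = []
--     completed_lines_hash = set(sent_list1)
--
--     for line in sent_list2:
--        if line not in completed_lines_hash:
--             save_labels.append(line)
--             completed_lines_hash.add(line)
--
--     return sent_list1, save_labels
-- ===== SOURCE B (Python) =====
-- def remove_duplicated_sentence(sent_list1, sent_list2):
--     ordered = list(dict.fromkeys(sent_list2))
--     seen = set(sent_list1)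
--     return sent_list1, [x for x in ordered if x not in seen]
-- ===== Notes on version B (the rewrite author's own statement) =====
-- stated objective: idiomatic
-- what changed: Replaces the single loop that maintains one growing set (handling intra-list dedup and cross-list filtering together) with two separate passes: dict.fromkeys for ordered dedup, then a comprehension filtering against a fixed set(sent_list1).
import Mathlib
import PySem

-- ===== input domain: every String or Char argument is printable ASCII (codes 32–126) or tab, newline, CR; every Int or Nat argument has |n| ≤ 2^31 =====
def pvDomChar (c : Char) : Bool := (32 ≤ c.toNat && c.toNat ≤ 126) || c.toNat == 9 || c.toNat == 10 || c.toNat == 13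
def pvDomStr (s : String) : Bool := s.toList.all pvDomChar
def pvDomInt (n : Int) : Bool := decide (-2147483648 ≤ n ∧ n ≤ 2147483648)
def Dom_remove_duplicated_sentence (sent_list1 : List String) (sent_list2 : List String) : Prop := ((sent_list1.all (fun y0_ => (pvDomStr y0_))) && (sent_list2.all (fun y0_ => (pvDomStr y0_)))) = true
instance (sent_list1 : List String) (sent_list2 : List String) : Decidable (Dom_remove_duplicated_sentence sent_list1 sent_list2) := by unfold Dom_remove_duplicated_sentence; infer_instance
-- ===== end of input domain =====

-- B replaces A's single loop with one growing set by two separate passes (ordered dedup, then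
-- filtering against a fixed set); same cost, more idiomatic. Return value only (no mutation).

-- ===== PORT A =====
-- one loop over sent_list2 carrying (save_labels, completed_lines_hash)
def remove_duplicated_sentence (sent_list1 : List String) (sent_list2 : List String) : List String × List String :=
  let init : List String × PySem.Set String := ([], PySem.Set.ofList sent_list1)
  let r := sent_list2.foldl
    (fun st line =>
      if PySem.Set.contains st.2 line then st
      else (st.1 ++ [line], PySem.Set.add st.2 line)) init
  (sent_list1, r.1)

-- ===== PORT B =====
-- ordered = list(dict.fromkeys(sent_list2)); seen = set(sent_list1); filter
def remove_duplicated_sentence_alt (sent_list1 : List String) (sent_list2 : List String) : List String × List String :=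
  let ordered := PySem.List.dedup sent_list2
  let seen := PySem.Set.ofList sent_list1
  (sent_list1, ordered.filter (fun x => !(PySem.Set.contains seen x)))

-- ===== PRECONDITION & SPEC =====
def Spec_remove_duplicated_sentence (sent_list1 : List String) (sent_list2 : List String) (out : List String × List String) : Prop := out = remove_duplicated_sentence_alt sent_list1 sent_list2
instance (sent_list1 : List String) (sent_list2 : List String) (out : List String × List String) : Decidable (Spec_remove_duplicated_sentence sent_list1 sent_list2 out) := by unfold Spec_remove_duplicated_sentence; infer_instance

-- ===== CLAIM (what is proved, stated in full; the proofs are below) =====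
def Claim_equal_remove_duplicated_sentence : Prop := ∀ (sent_list1 : List String) (sent_list2 : List String), Dom_remove_duplicated_sentence sent_list1 sent_list2 → Spec_remove_duplicated_sentence sent_list1 sent_list2 (remove_duplicated_sentence sent_list1 sent_list2)

-- ===== LEMMAS AND PROOFS =====

-- the "new first occurrences of l relative to seen set S", as a plain recursion
def stepDedup (l : List String) (S : PySem.Set String) : List String :=
  match l with
  | [] => []
  | a :: t => if PySem.Set.contains S a then stepDedup t S
              else a :: stepDedup t (PySem.Set.add S a)

-- A's loop produces acc ++ stepDedup l S
theorem loopA_eq (l : List String) (acc : List String) (S : PySem.Set String) :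
    (l.foldl (fun (st : List String × PySem.Set String) line =>
        if PySem.Set.contains st.2 line then st
        else (st.1 ++ [line], PySem.Set.add st.2 line)) (acc, S)).1
      = acc ++ stepDedup l S := by
  induction l generalizing acc S with
  | nil => simp [stepDedup]
  | cons a t ih =>
    by_cases h : a ∈ S
    · simp only [List.foldl_cons, stepDedup]
      rw [if_pos (by simp [PySem.Set.contains, h]),
          if_pos (by simp [PySem.Set.contains, h])]
      exact ih acc S
    · simp only [List.foldl_cons, stepDedup]
      rw [if_neg (by simp [PySem.Set.contains, h]),
          if_neg (by simp [PySem.Set.contains, h]),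
          ih (acc ++ [a]) (PySem.Set.add S a)]
      simp

-- foldl Set.add (the body of Set.ofList) produces S ++ stepDedup l S
theorem foldl_add_eq (l : List String) (S : PySem.Set String) :
    l.foldl PySem.Set.add S = S ++ stepDedup l S := by
  induction l generalizing S with
  | nil => simp [stepDedup]
  | cons a t ih =>
    by_cases h : a ∈ S
    · have hadd : PySem.Set.add S a = S := by simp [PySem.Set.add, h]
      simp only [List.foldl_cons, stepDedup, hadd]
      rw [if_pos (by simp [PySem.Set.contains, h])]
      exact ih S
    · have hadd : PySem.Set.add S a = S ++ [a] := by simp [PySem.Set.add, h]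
      simp only [List.foldl_cons, stepDedup, hadd]
      rw [if_neg (by simp [PySem.Set.contains, h]), ih (S ++ [a])]
      simp

theorem dedup_eq_stepDedup (l : List String) :
    PySem.List.dedup l = stepDedup l [] := by
  have := foldl_add_eq l []
  simpa [PySem.List.dedup_eq_ofList, PySem.Set.ofList_eq_foldl] using this

-- key lemma: the combined loop's output equals dedup-then-filter
theorem stepDedup_filter (l : List String) (S1 : PySem.Set String)
    (S K : PySem.Set String)
    (hinv : ∀ x, x ∈ S ↔ x ∈ S1 ∨ x ∈ K) :
    stepDedup l S = (stepDedup l K).filter (fun x => !(PySem.Set.contains S1 x)) := by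
  induction l generalizing S K with
  | nil => simp [stepDedup]
  | cons a t ih =>
    by_cases hS : a ∈ S
    · by_cases hK : a ∈ K
      · simp only [stepDedup]
        rw [if_pos (by simp [PySem.Set.contains, hS]),
            if_pos (by simp [PySem.Set.contains, hK])]
        exact ih S K hinv
      · have h1 : a ∈ S1 := by
          rcases (hinv a).mp hS with h | h
          · exact h
          · exact absurd h hK
        simp only [stepDedup]
        rw [if_pos (by simpa [PySem.Set.contains] using hS),
            if_neg (by simpa [PySem.Set.contains] using hK)]
        simp only [List.filter_cons]
        rw [if_neg (by simp [PySem.Set.contains, h1])]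
        exact ih S (PySem.Set.add K a) (by
          intro x
          rw [hinv x, PySem.Set.mem_add]
          by_cases hxa : x = a
          · subst hxa; simp [h1]
          · simp [hxa])
    · have h1 : a ∉ S1 := fun h => hS ((hinv a).mpr (Or.inl h))
      have hK : a ∉ K := fun h => hS ((hinv a).mpr (Or.inr h))
      simp only [stepDedup]
      rw [if_neg (by simpa [PySem.Set.contains] using hS),
          if_neg (by simpa [PySem.Set.contains] using hK)]
      simp only [List.filter_cons]
      rw [if_pos (by simp [PySem.Set.contains, h1])]
      rw [ih (PySem.Set.add S a) (PySem.Set.add K a) (by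
        intro x
        rw [PySem.Set.mem_add, PySem.Set.mem_add, hinv x]
        tauto)]

-- ===== VERDICT (by name: the statement is the Claim_ definition above) =====
theorem remove_duplicated_sentence_spec : Claim_equal_remove_duplicated_sentence := by
  intro s1 s2 _
  unfold Spec_remove_duplicated_sentence remove_duplicated_sentence remove_duplicated_sentence_alt
  simp only [loopA_eq, dedup_eq_stepDedup, List.nil_append]
  rw [stepDedup_filter s2 (PySem.Set.ofList s1) (PySem.Set.ofList s1) []
    (by intro x; simp)]
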